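-- pv_equiv track=rewrite | github.com/JonathanHaudenschild/SCC_Schichtplan_Algorithmus | data_transformation.py | calculate_total_capacity_needed
-- ===== SOURCE A (Python) =====
-- def calculate_total_capacity_needed(person_capacity_dict, people_shift_types_dict):
--     """
--     Calculate the total capacity needed for each shift type.
--
--     Args:
--         person_capacity_dict (dict): A dictionary mapping people to their capacity requirements.
--         people_shift_types_dict (dict): A dictionary mapping people to their preferred shift types.
--
--     Returns:
--         dict: A dictionary with total capacities needed for each shift type.
--     """
--     total_capacity = {}
--
--     for person, capacity in person_capacity_dict.items():
--         for shift_type, shift in people_shift_types_dict[person].items():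
--             if shift_type not in total_capacity:
--                 total_capacity[shift_type] = [0, 0]  # Changed to a list to allow in-place modification
--
--             total_capacity[shift_type][0] += shift[0]
--             total_capacity[shift_type][1] += shift[1]
--
--     return total_capacity
-- ===== SOURCE B (Python) =====
-- def calculate_total_capacity_needed(person_capacity_dict, people_shift_types_dict):
--     # Group-then-reduce: first collect every (shift[0], shift[1]) pair per shift type
--     # (in first-encounter key order), then collapse each group into its column sums.
--     groups = {}
--     for person in person_capacity_dict:
--         for shift_type, shift in people_shift_types_dict[person].items():
--             groups.setdefault(shift_type, []).append((shift[0], shift[1]))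
--     return {
--         shift_type: [sum(p[0] for p in pairs), sum(p[1] for p in pairs)]
--         for shift_type, pairs in groups.items()
--     }
-- ===== Notes on version B (the rewrite author's own statement) =====
-- stated objective: alternative
-- what changed: A accumulates running [sum0,sum1] totals in one pass with in-place index updates; B first materializes a grouping table shift_type -> list of (shift[0],shift[1]) pairs and then reduces each group to its column sums in a separate pass (group-then-reduce, preserving first-encounter key order).
import Mathlib
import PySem

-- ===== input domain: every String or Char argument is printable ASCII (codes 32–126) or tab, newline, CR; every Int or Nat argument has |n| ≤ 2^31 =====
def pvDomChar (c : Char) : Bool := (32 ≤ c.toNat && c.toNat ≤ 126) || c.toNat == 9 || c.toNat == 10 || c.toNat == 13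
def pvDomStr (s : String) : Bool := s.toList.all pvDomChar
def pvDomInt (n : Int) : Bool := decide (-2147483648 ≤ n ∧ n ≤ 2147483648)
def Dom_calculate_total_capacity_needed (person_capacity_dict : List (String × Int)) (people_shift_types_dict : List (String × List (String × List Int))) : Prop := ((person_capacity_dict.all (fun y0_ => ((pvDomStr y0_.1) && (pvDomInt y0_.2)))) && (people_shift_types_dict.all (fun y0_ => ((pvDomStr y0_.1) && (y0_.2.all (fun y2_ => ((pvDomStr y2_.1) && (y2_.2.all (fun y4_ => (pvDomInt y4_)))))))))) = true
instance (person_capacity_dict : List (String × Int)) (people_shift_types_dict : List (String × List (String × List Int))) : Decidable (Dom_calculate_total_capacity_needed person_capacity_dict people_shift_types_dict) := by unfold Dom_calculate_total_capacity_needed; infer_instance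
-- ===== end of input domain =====

-- B replaces A's single-pass in-place accumulation by a group-then-reduce two-pass shape (alternative decomposition, same cost).

-- ===== PORT A =====
-- the one accumulation step of A's inner loop: ensure [0,0], then total[st][0] += shift[0], total[st][1] += shift[1]
def pvAStep (total : PySem.Dict String (List Int)) (st : String × List Int) : PySem.Dict String (List Int) :=
  let total := if total.contains st.1 then total else total.insert st.1 [0, 0]
  let total := total.modify st.1 [] (fun v => PySem.List.pySetD v 0 (PySem.List.pyGetD v 0 0 + PySem.List.pyGetD st.2 0 0))
  total.modify st.1 [] (fun v => PySem.List.pySetD v 1 (PySem.List.pyGetD v 1 0 + PySem.List.pyGetD st.2 1 0))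

def calculate_total_capacity_needed (person_capacity_dict : List (String × Int)) (people_shift_types_dict : List (String × List (String × List Int))) : List (String × List Int) :=
  let pst := PySem.Dict.ofList people_shift_types_dict
  let total : PySem.Dict String (List Int) :=
    (PySem.Dict.ofList person_capacity_dict).items.foldl
      (fun total pc => (PySem.Dict.ofList (pst.getD pc.1 [])).items.foldl pvAStep total)
      PySem.Dict.empty
  total.items

-- ===== PORT B =====
-- the grouping step of B's first pass: groups.setdefault(shift_type, []).append((shift[0], shift[1]))
def pvBStep (g : PySem.Dict String (List (Int × Int))) (st : String × List Int) : PySem.Dict String (List (Int × Int)) :=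
  g.modify st.1 [] (fun l => l ++ [(PySem.List.pyGetD st.2 0 0, PySem.List.pyGetD st.2 1 0)])

-- the reduction of B's second pass: a group's list of pairs collapses to its column sums
def pvReduce (p : String × List (Int × Int)) : String × List Int :=
  (p.1, [(p.2.map (·.1)).sum, (p.2.map (·.2)).sum])

def calculate_total_capacity_needed_alt (person_capacity_dict : List (String × Int)) (people_shift_types_dict : List (String × List (String × List Int))) : List (String × List Int) :=
  let pst := PySem.Dict.ofList people_shift_types_dict
  let groups : PySem.Dict String (List (Int × Int)) :=
    (PySem.Dict.ofList person_capacity_dict).items.foldl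
      (fun g pc => (PySem.Dict.ofList (pst.getD pc.1 [])).items.foldl pvBStep g)
      PySem.Dict.empty
  groups.items.map pvReduce

-- ===== PRECONDITION & SPEC =====
-- Pre_ excludes exactly the inputs on which the Python A raises: a person of person_capacity_dict
-- missing from people_shift_types_dict (KeyError), or an accessed shift list of length < 2 (IndexError).
def Pre_calculate_total_capacity_needed (person_capacity_dict : List (String × Int)) (people_shift_types_dict : List (String × List (String × List Int))) : Prop :=
  (person_capacity_dict.all (fun p =>
    match (PySem.Dict.ofList people_shift_types_dict).get? p.1 with
    | some sd => (PySem.Dict.ofList sd).items.all (fun q => 2 ≤ q.2.length)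
    | none => false)) = true
instance (person_capacity_dict : List (String × Int)) (people_shift_types_dict : List (String × List (String × List Int))) : Decidable (Pre_calculate_total_capacity_needed person_capacity_dict people_shift_types_dict) := by unfold Pre_calculate_total_capacity_needed; infer_instance

def pvWitness_calculate_total_capacity_needed : (List (String × Int)) × (List (String × List (String × List Int))) :=
  ([("a", 1), ("b", 2)], [("a", [("x", [1, 2]), ("y", [3, 4])]), ("b", [("x", [5, 6])])])

def Spec_calculate_total_capacity_needed (person_capacity_dict : List (String × Int)) (people_shift_types_dict : List (String × List (String × List Int))) (out : List (String × List Int)) : Prop := out = calculate_total_capacity_needed_alt person_capacity_dict people_shift_types_dict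
instance (person_capacity_dict : List (String × Int)) (people_shift_types_dict : List (String × List (String × List Int))) (out : List (String × List Int)) : Decidable (Spec_calculate_total_capacity_needed person_capacity_dict people_shift_types_dict out) := by unfold Spec_calculate_total_capacity_needed; infer_instance

-- ===== CLAIM (what is proved, stated in full; the proofs are below) =====
def Claim_equal_calculate_total_capacity_needed : Prop := ∀ (person_capacity_dict : List (String × Int)) (people_shift_types_dict : List (String × List (String × List Int))), Dom_calculate_total_capacity_needed person_capacity_dict people_shift_types_dict → Pre_calculate_total_capacity_needed person_capacity_dict people_shift_types_dict → Spec_calculate_total_capacity_needed person_capacity_dict people_shift_types_dict (calculate_total_capacity_needed person_capacity_dict people_shift_types_dict)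

-- ===== LEMMAS AND PROOFS =====

theorem pv_contains_map_reduce (its : List (String × List (Int × Int))) (k : String) :
    (PySem.Dict.mk (its.map pvReduce)).contains k = (PySem.Dict.mk its).contains k := by
  simp [PySem.Dict.contains, List.any_map, Function.comp_def, pvReduce]

theorem pv_get?_map_reduce (its : List (String × List (Int × Int))) (k : String) :
    (PySem.Dict.mk (its.map pvReduce)).get? k
      = ((PySem.Dict.mk its).get? k).map (fun l => [(l.map (·.1)).sum, (l.map (·.2)).sum]) := by
  induction its with
  | nil => rfl
  | cons p t ih =>
    rw [List.map_cons, PySem.Dict.get?_mk_cons, PySem.Dict.get?_mk_cons]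
    by_cases h : p.1 == k
    · simp [pvReduce, h]
    · simp only [pvReduce] at *
      simp [h, ih]

theorem pv_insert_map_reduce (its : List (String × List (Int × Int))) (k : String) (l : List (Int × Int)) :
    (PySem.Dict.mk (its.map pvReduce)).insert k [(l.map (·.1)).sum, (l.map (·.2)).sum]
      = PySem.Dict.mk (((PySem.Dict.mk its).insert k l).items.map pvReduce) := by
  simp only [PySem.Dict.insert, pv_contains_map_reduce]
  cases h : (PySem.Dict.mk its).contains k
  · simp [pvReduce]
  · simp only [if_true, List.map_map]
    congr 1
    apply List.map_congr_left
    intro p _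
    simp only [Function.comp_apply, pvReduce]
    split_ifs with hp <;> simp_all

theorem pv_upd (c0 c1 a b : Int) :
    PySem.List.pySetD (PySem.List.pySetD [c0, c1] 0 (PySem.List.pyGetD [c0, c1] 0 0 + a)) 1
      (PySem.List.pyGetD (PySem.List.pySetD [c0, c1] 0 (PySem.List.pyGetD [c0, c1] 0 0 + a)) 1 0 + b)
    = [c0 + a, c1 + b] := by
  simp [pysem]

theorem pv_step (its : List (String × List (Int × Int))) (st : String × List Int) :
    pvAStep (PySem.Dict.mk (its.map pvReduce)) st
      = PySem.Dict.mk ((pvBStep (PySem.Dict.mk its) st).items.map pvReduce) := by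
  unfold pvAStep pvBStep
  simp only [PySem.Dict.modify, pv_contains_map_reduce]
  cases h : (PySem.Dict.mk its).contains st.1
  · rw [PySem.Dict.getD_of_not_contains _ _ h]
    simp only [Bool.false_eq_true, if_false, PySem.Dict.getD_insert_self, List.nil_append]
    rw [PySem.Dict.insert_insert_self, PySem.Dict.insert_insert_self, pv_upd,
      ← pv_insert_map_reduce its st.1 [(PySem.List.pyGetD st.2 0 0, PySem.List.pyGetD st.2 1 0)]]
    norm_num
  · obtain ⟨l, hl⟩ : ∃ l, (PySem.Dict.mk its).get? st.1 = some l := by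
      rw [← Option.isSome_iff_exists, ← PySem.Dict.contains_eq_isSome_get?]
      exact h
    have hred : (PySem.Dict.mk (its.map pvReduce)).getD st.1 []
        = [(l.map (·.1)).sum, (l.map (·.2)).sum] := by
      rw [PySem.Dict.getD_eq_get?_getD, pv_get?_map_reduce, hl]; rfl
    rw [PySem.Dict.getD_eq_get?_getD ({ items := its }), hl]
    simp only [if_true, hred, PySem.Dict.getD_insert_self, Option.getD_some]
    rw [pv_upd, PySem.Dict.insert_insert_self,
      ← pv_insert_map_reduce its st.1 (l ++ [(PySem.List.pyGetD st.2 0 0, PySem.List.pyGetD st.2 1 0)])]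
    simp
theorem pv_inner (l : List (String × List Int)) (its : List (String × List (Int × Int))) :
    l.foldl pvAStep (PySem.Dict.mk (its.map pvReduce))
      = PySem.Dict.mk ((l.foldl pvBStep (PySem.Dict.mk its)).items.map pvReduce) := by
  induction l generalizing its with
  | nil => rfl
  | cons st l ih =>
    simp only [List.foldl_cons, pv_step its st]
    exact ih _

theorem pv_outer (pst : PySem.Dict String (List (String × List Int)))
    (l : List (String × Int)) (its : List (String × List (Int × Int))) :
    l.foldl (fun total pc => (PySem.Dict.ofList (pst.getD pc.1 [])).items.foldl pvAStep total)
        (PySem.Dict.mk (its.map pvReduce))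
      = PySem.Dict.mk ((l.foldl (fun g pc => (PySem.Dict.ofList (pst.getD pc.1 [])).items.foldl pvBStep g)
          (PySem.Dict.mk its)).items.map pvReduce) := by
  induction l generalizing its with
  | nil => rfl
  | cons pc l ih =>
    simp only [List.foldl_cons, pv_inner]
    exact ih _

-- ===== VERDICT (by name: the statement is the Claim_ definition above) =====
theorem calculate_total_capacity_needed_spec : Claim_equal_calculate_total_capacity_needed := by
  intro pcd pstd _ _
  unfold Spec_calculate_total_capacity_needed calculate_total_capacity_needed calculate_total_capacity_needed_alt
  have h := pv_outer (PySem.Dict.ofList pstd) (PySem.Dict.ofList pcd).items []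
  simpa using congrArg PySem.Dict.items h
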